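-- pv_equiv track=rewrite | github.com/wingpom/CP164-Datastructures | Assignments/A6.py | binary_flip2
-- ===== SOURCE A (Python) =====
-- def binary_flip2(list1):
--     """
--     -------------------------------------------------------
--     Description:
--         Pick the first pair of items in a list and swap them
--         Repeats the above until the end of list
--         If list length is odd, no swaps for the last item
--         Function does not change the input list, returns a new list
--         Uses Recursion
--     Assert: list1 is a list
--     Use: list2 = binary_flip2(list1)
--     -------------------------------------------------------
--     Parameters:
--         list1: a list containing arbitrary items (list)
--     Returns:
--         list2: updated version of list1 (list)
--     -------------------------------------------------------
--     """
--     assert isinstance(list1, list), 'invalid list1'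
--     if list1 == []:
--         return []
--     if len(list1) == 1:
--         return list1
--     list2 = [list1[1]] + [list1[0]] + binary_flip2(list1[2:])
--     return list2
-- ===== SOURCE B (Python) =====
-- def binary_flip2(list1):
--     assert isinstance(list1, list), 'invalid list1'
--     list2 = []
--     i = 0
--     n = len(list1)
--     while i + 1 < n:
--         list2.append(list1[i + 1])
--         list2.append(list1[i])
--         i += 2
--     if i < n:
--         list2.append(list1[i])
--     return list2
-- ===== Notes on version B (the rewrite author's own statement) =====
-- stated objective: faster
-- what changed: Replaced the recursion that rebuilds the tail with list slicing and concatenation at every step by a single iterative index loop appending each swapped pair to the output list.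
import Mathlib
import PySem

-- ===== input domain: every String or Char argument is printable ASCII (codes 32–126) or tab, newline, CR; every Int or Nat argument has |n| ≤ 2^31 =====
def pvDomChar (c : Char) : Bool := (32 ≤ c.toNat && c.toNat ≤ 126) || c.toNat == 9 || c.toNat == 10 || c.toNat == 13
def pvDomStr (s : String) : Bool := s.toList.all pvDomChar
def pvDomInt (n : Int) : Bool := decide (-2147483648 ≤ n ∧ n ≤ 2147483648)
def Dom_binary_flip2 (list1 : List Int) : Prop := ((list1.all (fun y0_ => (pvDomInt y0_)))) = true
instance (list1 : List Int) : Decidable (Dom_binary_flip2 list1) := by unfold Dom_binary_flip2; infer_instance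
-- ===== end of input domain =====

-- B replaces A's slice-and-concatenate recursion by a single iterative index loop (O(n) instead of O(n^2)).


-- ===== PORT A =====
-- A: recursion; the three cases [], [x], x::y::rest mirror A's 'list1 == []', 'len(list1)==1',
-- and 'list1[1], list1[0], list1[2:]' accesses exactly.
def binary_flip2 (list1 : List Int) : List Int :=
  match list1 with
  | [] => []
  | [a] => [a]
  | a :: b :: rest => b :: a :: binary_flip2 rest

-- ===== PORT B =====
-- B's while loop: state (i, acc); appends list1[i+1], list1[i] while i+1 < n, then the odd leftover.
def bf2Loop (xs : List Int) (n i : Nat) (acc : List Int) : List Int :=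
  if _ : i + 1 < n then
    bf2Loop xs n (i + 2) (acc ++ [xs.getD (i + 1) 0, xs.getD i 0])
  else if i < n then acc ++ [xs.getD i 0] else acc
termination_by n - i

def binary_flip2_alt (list1 : List Int) : List Int :=
  bf2Loop list1 list1.length 0 []

-- ===== PRECONDITION & SPEC =====
def Spec_binary_flip2 (list1 : List Int) (out : List Int) : Prop := out = binary_flip2_alt list1
instance (list1 : List Int) (out : List Int) : Decidable (Spec_binary_flip2 list1 out) := by unfold Spec_binary_flip2; infer_instance

-- ===== CLAIM (what is proved, stated in full; the proofs are below) =====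
def Claim_equal_binary_flip2 : Prop := ∀ (list1 : List Int), Dom_binary_flip2 list1 → Spec_binary_flip2 list1 (binary_flip2 list1)

-- ===== LEMMAS AND PROOFS =====

-- The loop from index i computes acc ++ (A applied to the tail from i); fuel k bounds the remaining length.
lemma bf2Loop_eq_aux (xs : List Int) :
    ∀ (k i : Nat) (acc : List Int), xs.length - i ≤ k →
      bf2Loop xs xs.length i acc = acc ++ binary_flip2 (xs.drop i) := by
  intro k
  induction k with
  | zero =>
    intro i acc hk
    have hle : xs.length ≤ i := by omega
    rw [bf2Loop]
    simp [binary_flip2, List.drop_eq_nil_of_le hle, Nat.not_lt_of_le hle,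
      Nat.not_lt_of_le (le_trans hle (Nat.le_succ i))]
  | succ k ihk =>
    intro i acc hk
    rw [bf2Loop]
    rcases h : xs.drop i with _ | ⟨a, _ | ⟨b, rest⟩⟩
    · have hle : xs.length ≤ i := by simpa [List.drop_eq_nil_iff] using h
      simp [binary_flip2, Nat.not_lt_of_le hle,
        Nat.not_lt_of_le (le_trans hle (Nat.le_succ i))]
    · have hlen : xs.length = i + 1 := by
        have := congrArg List.length h; simp at this; omega
      have hi : i < xs.length := by omega
      have ha : xs[i]? = some a := by
        have h0 : (xs.drop i)[0]? = xs[i + 0]? := List.getElem?_drop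
        rw [h] at h0; simpa using h0.symm
      have ha' : xs[i] = a := by
        rw [List.getElem?_eq_getElem hi] at ha; exact Option.some.inj ha
      simp [binary_flip2, hlen, List.getD, ha']
    · have hlen2 : i + 2 ≤ xs.length := by
        have := congrArg List.length h; simp at this; omega
      have hi : i < xs.length := by omega
      have hi1 : i + 1 < xs.length := by omega
      have ha : xs[i]? = some a := by
        have h0 : (xs.drop i)[0]? = xs[i + 0]? := List.getElem?_drop
        rw [h] at h0; simpa using h0.symm
      have hb : xs[i + 1]? = some b := by
        have h1 : (xs.drop i)[1]? = xs[i + 1]? := List.getElem?_drop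
        rw [h] at h1; simpa using h1.symm
      have ha' : xs[i] = a := by
        rw [List.getElem?_eq_getElem hi] at ha; exact Option.some.inj ha
      have hb' : xs[i + 1] = b := by
        rw [List.getElem?_eq_getElem hi1] at hb; exact Option.some.inj hb
      have hdrop : xs.drop (i + 2) = rest := by
        have hd : xs.drop (i + 2) = (xs.drop i).drop 2 := by
          rw [List.drop_drop]
        rw [hd, h]; rfl
      rw [dif_pos hi1, ihk (i + 2) _ (by omega), hdrop]
      simp [binary_flip2, List.getD, ha, hb]

lemma bf2Loop_eq (xs : List Int) (acc : List Int) :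
    bf2Loop xs xs.length 0 acc = acc ++ binary_flip2 xs := by
  have := bf2Loop_eq_aux xs xs.length 0 acc (by omega)
  simpa using this

-- ===== VERDICT (by name: the statement is the Claim_ definition above) =====
theorem binary_flip2_spec : Claim_equal_binary_flip2 := by
  intro l _
  unfold Spec_binary_flip2 binary_flip2_alt
  rw [bf2Loop_eq]
  rfl
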